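-- pv_equiv track=rewrite | github.com/ndsvw/Largest-square-formed-in-a-matrix-Problem | largest_square_border.py | calculate_longest_sequences
-- ===== SOURCE A (Python) =====
-- def calculate_longest_sequences(matrix):
--     """
--     A method that calculates the largest square consisting of only 1's at the border of a given binary matrix
--         time complexity: O(n*m*max(m,n))
--         space complexity: O(m*n)
--
--     Parameters
--     ----------
--     matrix : int[[]]
--         a 2-dimensional list
--
--     Returns
--     -------
--     (h, v)
--         a tuple of two 2-dimensional lists:
--         h: for every entry matrix[i][j] the longest hoirzontal sequence of '1's including matrix[i][j]
--         v: for every entry matrix[i][j] the longest vertical sequence of '1's including matrix[i][j]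
--     """
--     n = len(matrix)
--     m = len(matrix[0])
--
--     h = [[None for _ in range(m)] for _ in range(n)]
--     v = [[None for _ in range(m)] for _ in range(n)]
--
--     for i in range(n):
--         for j in range(m):
--             if matrix[i][j] == 0:
--                 h[i][j] = 0
--                 v[i][j] = 0
--             else:
--                 h[i][j] = h[i][j-1] + 1 if j > 0 else 1
--                 v[i][j] = v[i-1][j] + 1 if i > 0 else 1
--     return h, v
-- ===== SOURCE B (Python) =====
-- def calculate_longest_sequences(matrix):
--     n = len(matrix)
--     m = len(matrix[0])
--     h = []
--     for row in matrix:
--         c = 0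
--         hr = []
--         for j in range(m):
--             c = 0 if row[j] == 0 else c + 1
--             hr.append(c)
--         h.append(hr)
--     v = [[0] * m for _ in range(n)]
--     for j in range(m):
--         c = 0
--         for i in range(n):
--             c = 0 if matrix[i][j] == 0 else c + 1
--             v[i][j] = c
--     return h, v
-- ===== Notes on version B (the rewrite author's own statement) =====
-- stated objective: alternative
-- what changed: Replaces A's single combined row-major DP pass with table self-references (h[i][j-1], v[i-1][j]) by two independent run-length scans: h via a per-row running counter, and v via a column-major traversal (outer loop over columns) with a per-column running counter, so no output table is ever read back.
import Mathlib
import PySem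

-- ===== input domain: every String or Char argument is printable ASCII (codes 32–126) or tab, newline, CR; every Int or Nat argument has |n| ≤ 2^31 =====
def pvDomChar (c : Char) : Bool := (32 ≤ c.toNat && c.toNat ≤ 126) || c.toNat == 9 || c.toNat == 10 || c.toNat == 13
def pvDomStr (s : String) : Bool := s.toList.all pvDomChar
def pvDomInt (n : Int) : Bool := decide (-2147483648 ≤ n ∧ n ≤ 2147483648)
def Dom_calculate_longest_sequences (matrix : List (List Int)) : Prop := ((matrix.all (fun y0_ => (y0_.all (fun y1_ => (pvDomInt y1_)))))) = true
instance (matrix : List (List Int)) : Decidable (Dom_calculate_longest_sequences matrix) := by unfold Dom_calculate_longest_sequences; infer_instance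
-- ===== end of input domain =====

-- B computes h and v by two independent run-length scans (row-wise counter for h,
-- column-major counter for v) instead of A's single combined DP pass that reads its
-- own output tables; same O(n*m) cost, equivalence of return values proved below.

-- ===== PORT A =====
-- one iteration of A's inner j-loop body, building row i of h and v by appending;
-- h reads back h[i][j-1], v reads the previous v row (none when i = 0).
def pvA_row (prevV : Option (List Int)) (m : Nat) (row : List Int) : List Int × List Int :=
  (List.range m).foldl (fun acc j =>
    let x := row.getD j 0      -- matrix[i][j]; in range under Pre_
    (acc.1 ++ [if x = 0 then 0 else if 0 < j then acc.1.getD (j - 1) 0 + 1 else 1],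
     acc.2 ++ [if x = 0 then 0 else
       match prevV with
       | none => 1
       | some pv => pv.getD j 0 + 1]))
    ([], [])

-- A's outer i-loop: each row's v becomes the next row's v[i-1].
def pvA_rows (m : Nat) (prevV : Option (List Int)) : List (List Int) → List (List Int) × List (List Int)
  | [] => ([], [])
  | r :: rest =>
    let hv := pvA_row prevV m r
    let rec_ := pvA_rows m (some hv.2) rest
    (hv.1 :: rec_.1, hv.2 :: rec_.2)

def calculate_longest_sequences (matrix : List (List Int)) : List (List Int) × List (List Int) :=
  let m := (matrix.headD []).length   -- len(matrix[0]); matrix ≠ [] under Pre_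
  pvA_rows m none matrix

-- ===== PORT B =====
-- B's running-counter loop: c = 0 if x == 0 else c + 1, appending c each step.
def pvScan (c : Int) : List Int → List Int
  | [] => []
  | x :: xs =>
    let c' : Int := if x = 0 then 0 else c + 1
    c' :: pvScan c' xs

def calculate_longest_sequences_alt (matrix : List (List Int)) : List (List Int) × List (List Int) :=
  let m := (matrix.headD []).length   -- len(matrix[0]); matrix ≠ [] under Pre_
  -- h: per-row left-to-right running counter over the first m cells
  let h := matrix.map (fun row => pvScan 0 (row.take m))
  -- v: column-major — scan column j top-to-bottom, then assemble row i from the columns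
  let cols := (List.range m).map (fun j => pvScan 0 (matrix.map (fun row => row.getD j 0)))
  let v := (List.range matrix.length).map (fun i => cols.map (fun col => col.getD i 0))
  (h, v)

-- ===== PRECONDITION & SPEC =====
-- Pre_ excludes exactly the inputs where the Python raises IndexError:
-- the empty matrix (len(matrix[0])) and matrices with a row shorter than row 0.
def Pre_calculate_longest_sequences (matrix : List (List Int)) : Prop :=
  matrix ≠ [] ∧ ∀ row ∈ matrix, (matrix.headD []).length ≤ row.length
instance (matrix : List (List Int)) : Decidable (Pre_calculate_longest_sequences matrix) := by unfold Pre_calculate_longest_sequences; infer_instance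
def pvWitness_calculate_longest_sequences : List (List Int) := [[1, 0], [1, 1]]

def Spec_calculate_longest_sequences (matrix : List (List Int)) (out : List (List Int) × List (List Int)) : Prop := out = calculate_longest_sequences_alt matrix
instance (matrix : List (List Int)) (out : List (List Int) × List (List Int)) : Decidable (Spec_calculate_longest_sequences matrix out) := by unfold Spec_calculate_longest_sequences; infer_instance

-- ===== CLAIM (what is proved, stated in full; the proofs are below) =====
def Claim_equal_calculate_longest_sequences : Prop := ∀ (matrix : List (List Int)), Dom_calculate_longest_sequences matrix → Pre_calculate_longest_sequences matrix → Spec_calculate_longest_sequences matrix (calculate_longest_sequences matrix)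

-- ===== LEMMAS AND PROOFS =====

theorem pvScan_length (c : Int) (l : List Int) : (pvScan c l).length = l.length := by
  induction l generalizing c with
  | nil => rfl
  | cons x xs ih => simp [pvScan, ih]

theorem pvScan_append_singleton (c : Int) (l : List Int) (x : Int) :
    pvScan c (l ++ [x]) = pvScan c l ++ [if x = 0 then 0 else (pvScan c l).getLastD c + 1] := by
  induction l generalizing c with
  | nil => simp [pvScan]
  | cons y ys ih =>
    simp only [List.cons_append, pvScan, ih]
    simp [List.getLastD_eq_getLast?]
    cases h : (pvScan (if y = 0 then 0 else c + 1) ys).getLast? <;> simp <;>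
      cases ys <;> simp_all [pvScan]

theorem getD_last_of_length (l : List Int) (m : Nat) (h : l.length = m) (hm : 0 < m) :
    l.getD (m - 1) 0 = l.getLastD 0 := by
  subst h
  cases l with
  | nil => simp at hm
  | cons x xs =>
    simp [List.getLastD_eq_getLast?, List.getLast?_eq_getElem?, List.getD_eq_getElem?_getD]

-- v row produced by A's inner loop, as a map
def pvVRow (prevV : Option (List Int)) (m : Nat) (row : List Int) : List Int :=
  (List.range m).map (fun j => if row.getD j 0 = 0 then 0 else
    match prevV with
    | none => 1
    | some pv => pv.getD j 0 + 1)

-- A's inner loop = (running-counter scan of the first m cells, the v map)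
theorem pvA_row_eq (prevV : Option (List Int)) (m : Nat) (row : List Int) (hm : m ≤ row.length) :
    pvA_row prevV m row = (pvScan 0 (row.take m), pvVRow prevV m row) := by
  induction m with
  | zero => simp [pvA_row, pvVRow, pvScan]
  | succ k ih =>
    have hk : k ≤ row.length := Nat.le_of_succ_le hm
    have step := ih hk
    have hrange : List.range (k + 1) = List.range k ++ [k] := List.range_succ
    have htake : row.take (k + 1) = row.take k ++ [row.getD k 0] := by
      have hlt : k < row.length := hm
      rw [List.take_add_one]
      simp [List.getElem?_eq_getElem hlt, List.getD_eq_getElem?_getD,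
        Option.toList]
    unfold pvA_row at step ⊢
    rw [hrange, List.foldl_append, step]
    simp only [List.foldl_cons, List.foldl_nil, Prod.mk.injEq]
    constructor
    · -- h component
      rw [htake, pvScan_append_singleton]
      congr 1
      by_cases hx : row.getD k 0 = 0
      · rw [if_pos hx, if_pos hx]
      · rw [if_neg hx, if_neg hx]
        by_cases hk0 : 0 < k
        · rw [if_pos hk0]
          have hlen : (pvScan 0 (row.take k)).length = k := by
            rw [pvScan_length, List.length_take]; omega
          rw [getD_last_of_length _ k hlen hk0]
        · have hk0' : k = 0 := by omega
          subst hk0'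
          simp [pvScan, List.getLastD]
    · -- v component
      unfold pvVRow
      rw [hrange, List.map_append]
      rfl

-- getD of a range-map at an in-range index
theorem getD_range_map (f : Nat → Int) (m j : Nat) (hj : j < m) :
    ((List.range m).map f).getD j 0 = f j := by
  rw [List.getD_eq_getElem?_getD, List.getElem?_map]
  simp [List.getElem?_range hj]

theorem pvScan_getD_zero (c x : Int) (xs : List Int) :
    (pvScan c (x :: xs)).getD 0 0 = (if x = 0 then 0 else c + 1) := by
  simp [pvScan, List.getD]

theorem pvScan_getD_succ (c x : Int) (xs : List Int) (i : Nat) :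
    (pvScan c (x :: xs)).getD (i + 1) 0 = (pvScan (if x = 0 then 0 else c + 1) xs).getD i 0 := by
  simp [pvScan, List.getD]

-- the v rows of A's loop, started from a concrete previous row pv, are exactly
-- the column scans of B assembled row by row
theorem pvA_rows_v (m : Nat) (rows : List (List Int)) (pv : List Int) :
    (pvA_rows m (some pv) rows).2 =
      (List.range rows.length).map (fun i => (List.range m).map (fun j =>
        (pvScan (pv.getD j 0) (rows.map (fun row => row.getD j 0))).getD i 0)) := by
  induction rows generalizing pv with
  | nil => simp [pvA_rows]
  | cons r rest ih =>
    have hvr : (pvA_row (some pv) m r).2 = pvVRow (some pv) m r := by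
      have := pvA_row_eq (some pv) (min m r.length) r (Nat.min_le_right _ _)
      -- we can't use pvA_row_eq without m ≤ r.length; prove v component directly
      clear this
      unfold pvA_row
      have : ∀ (l : List Nat) (a : List Int × List Int),
          (l.foldl (fun acc j =>
            let x := r.getD j 0
            (acc.1 ++ [if x = 0 then 0 else if 0 < j then acc.1.getD (j - 1) 0 + 1 else 1],
             acc.2 ++ [if x = 0 then 0 else pv.getD j 0 + 1])) a).2 =
          a.2 ++ l.map (fun j => if r.getD j 0 = 0 then 0 else pv.getD j 0 + 1) := by
        intro l
        induction l with
        | nil => simp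
        | cons y ys ihl =>
          intro a
          simp only [List.foldl_cons, List.map_cons]
          rw [ihl]
          simp
      simpa [pvVRow] using this (List.range m) ([], [])
    unfold pvA_rows
    dsimp only
    rw [hvr, ih (pvVRow (some pv) m r)]
    have hlen : (r :: rest).length = rest.length + 1 := rfl
    rw [hlen, List.range_succ_eq_map, List.map_cons, List.map_map]
    refine (List.cons_eq_cons).mpr ⟨?_, ?_⟩
    · -- first row
      unfold pvVRow
      apply List.map_congr_left
      intro j hj
      rw [List.map_cons, pvScan_getD_zero]
    · -- remaining rows
      apply List.map_congr_left
      intro i _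
      simp only [Function.comp_apply]
      apply List.map_congr_left
      intro j hj
      have hjm : j < m := List.mem_range.mp hj
      unfold pvVRow
      rw [getD_range_map _ m j hjm, List.map_cons, pvScan_getD_succ]

-- starting A with prevV = none is the same as starting with an all-zero previous row
theorem pvA_rows_none (m : Nat) (rows : List (List Int)) :
    pvA_rows m none rows = pvA_rows m (some (List.replicate m 0)) rows := by
  cases rows with
  | nil => rfl
  | cons r rest =>
    unfold pvA_rows
    have hrow : pvA_row none m r = pvA_row (some (List.replicate m 0)) m r := by
      unfold pvA_row
      congr 1
      funext acc j
      simp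
    rw [hrow]

-- h rows of A's loop are B's per-row scans
theorem pvA_rows_h (m : Nat) (rows : List (List Int)) (pv : Option (List Int))
    (hlen : ∀ row ∈ rows, m ≤ row.length) :
    (pvA_rows m pv rows).1 = rows.map (fun row => pvScan 0 (row.take m)) := by
  induction rows generalizing pv with
  | nil => rfl
  | cons r rest ih =>
    unfold pvA_rows
    dsimp only
    have hr : m ≤ r.length := hlen r (List.mem_cons_self ..)
    rw [ih _ (fun row hrow => hlen row (List.mem_cons_of_mem _ hrow))]
    simp [(pvA_row_eq pv m r hr)]

-- ===== VERDICT (by name: the statement is the Claim_ definition above) =====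
theorem calculate_longest_sequences_spec : Claim_equal_calculate_longest_sequences := by
  intro matrix _ hpre
  obtain ⟨hne, hrows⟩ := hpre
  unfold Spec_calculate_longest_sequences calculate_longest_sequences calculate_longest_sequences_alt
  set m := (matrix.headD []).length with hm
  apply Prod.ext
  · -- h component
    simp only []
    rw [pvA_rows_h m matrix none (fun row hrow => hrows row hrow)]
  · -- v component
    simp only []
    rw [pvA_rows_none, pvA_rows_v]
    apply List.map_congr_left
    intro i _
    rw [List.map_map]
    apply List.map_congr_left
    intro j hj
    simp [Function.comp]
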